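-- pv_equiv track=rewrite | github.com/rfransse/Travaux_perso | teteDeLivre.py | amis
-- ===== SOURCE A (Python) =====
-- def amis(bdd, nom, d):
--     """détermine les amis situés à une distance d'au plus d
--
--     Args:
--         bdd (dict): keys (str) :    username
--                     values (list) : list of friends
--         nom (str): username
--         d (int): distance_max avec le username
--
--     Returns:
--         res (list): list of friends
--     """
--     def f(bdd, nom, k, d_max, res):
--
--         if k == d_max-1: # cas de base je prends les amis du noeud de distance dmax-1
--                 if nom in bdd:
--                     res = res + bdd[nom]
--
--         else:
--             if nom in bdd: # si la personne a des amis
--                 for ami in bdd[nom]: # pour chaque ami du nom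
--                         res = [ami] + f(bdd, ami, k+1, d_max, res) # le résultat est l'ami et leurs ami
--
--         return res
--
--     res = set(f(bdd, nom, 0, d, []))
--     res.discard(nom)
--     return res
-- ===== SOURCE B (Python) =====
-- def amis(bdd, nom, d):
--     """Level-synchronous reachability: saturate the reached set one step at a
--     time, stopping early at a fixpoint, instead of enumerating all walks."""
--     reached = {nom}
--     k = d
--     while k > 0:
--         new = [v for u in reached for v in bdd.get(u, [])]
--         if all(v in reached for v in new):
--             break
--         reached.update(new)
--         k -= 1
--     reached.discard(nom)
--     return reached
-- ===== Notes on version B (the rewrite author's own statement) =====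
-- stated objective: alternative
-- what changed: A enumerates every walk of length up to d by recursion (exponential in the number of paths); B saturates a reached set level by level with a visited-set/fixpoint early exit, so each saturation round only scans the current reached set.
-- outside the precondition, e.g. on amis({'a': ['b']}, 'a', 0): A returns {'b'}, B returns set(); on amis({'a': ['a']}, 'a', 0): A raises RecursionError, B returns set()
import Mathlib
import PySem

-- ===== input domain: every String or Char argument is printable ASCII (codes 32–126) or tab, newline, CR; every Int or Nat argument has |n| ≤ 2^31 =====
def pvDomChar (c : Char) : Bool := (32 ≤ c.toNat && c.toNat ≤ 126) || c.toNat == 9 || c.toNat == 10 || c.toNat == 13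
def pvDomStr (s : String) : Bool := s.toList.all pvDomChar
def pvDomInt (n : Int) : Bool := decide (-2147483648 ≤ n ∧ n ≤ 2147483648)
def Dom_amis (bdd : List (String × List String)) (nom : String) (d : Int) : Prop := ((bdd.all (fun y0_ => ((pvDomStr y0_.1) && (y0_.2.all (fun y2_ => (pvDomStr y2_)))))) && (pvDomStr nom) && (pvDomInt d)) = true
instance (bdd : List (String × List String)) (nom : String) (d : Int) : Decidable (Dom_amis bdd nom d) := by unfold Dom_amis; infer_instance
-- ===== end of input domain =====

-- B replaces A's recursive enumeration of all walks of length ≤ d by a level-synchronous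
-- saturation of the reached set with an early fixpoint exit (objective: alternative algorithm).
-- Both Pythons return a *set*; set iteration order is not modelled, so both ports represent
-- the returned set by its sorted list of distinct elements.

-- ===== PORT A =====
-- first-match lookup in the association list representing the Python dict
def alGet? (bdd : List (String × List String)) (u : String) : Option (List String) :=
  PySem.Dict.get? (PySem.Dict.ofList bdd) u

def alGetD (bdd : List (String × List String)) (u : String) : List String :=
  (alGet? bdd u).getD []

-- inner recursion f of A; `fuel` only makes the recursion total in Lean: along real runs
-- (k = 0, d ≥ 1, fuel = d.toNat) the base case k = dmax-1 is reached before fuel runs out.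
def fAmis (bdd : List (String × List String)) (nom : String) (k dmax : Int) (res : List String) (fuel : Nat) : List String :=
  if k = dmax - 1 then
    match alGet? bdd nom with
    | some fr => res ++ fr
    | none => res
  else
    match alGet? bdd nom with
    | some fr =>
      match fuel with
      | 0 => res
      | fuel' + 1 => List.foldl (fun r ami => ami :: fAmis bdd ami (k + 1) dmax r fuel') res fr
    | none => res
termination_by fuel
decreasing_by omega

def amis (bdd : List (String × List String)) (nom : String) (d : Int) : List String :=
  PySem.List.sorted
    (PySem.Set.discard (PySem.Set.ofList (fAmis bdd nom 0 d [] d.toNat)) nom)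
    (fun x => x) false

-- ===== PORT B =====
-- the while-loop of Source B: at most k iterations, early exit at a fixpoint
def satLoop (bdd : List (String × List String)) (reached : PySem.Set String) : Nat → PySem.Set String
  | 0 => reached
  | fuel + 1 =>
    let new := reached.flatMap (fun u => alGetD bdd u)
    if new.all (fun v => PySem.Set.contains reached v) then reached
    else satLoop bdd (PySem.Set.union reached new) fuel

def amis_alt (bdd : List (String × List String)) (nom : String) (d : Int) : List String :=
  PySem.List.sorted
    (PySem.Set.discard (satLoop bdd (PySem.Set.ofList [nom]) d.toNat) nom)
    (fun x => x) false

-- ===== PRECONDITION & SPEC =====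
-- Pre_ excludes d ≤ 0 with a nom that has friends: there A's depth cutoff `k == d_max-1`
-- can never fire, so A recurses until it raises RecursionError on any cycle, and on acyclic
-- data returns every reachable node regardless of d — an artefact of the missing cutoff.
-- (d ≤ 0 with no friends stays inside: both return the empty set there.)
def Pre_amis (bdd : List (String × List String)) (nom : String) (d : Int) : Prop :=
  1 ≤ d ∨ PySem.Dict.getD (PySem.Dict.ofList bdd) nom [] = []
instance (bdd : List (String × List String)) (nom : String) (d : Int) : Decidable (Pre_amis bdd nom d) := by unfold Pre_amis; infer_instance

def pvWitness_amis : (List (String × List String)) × String × Int :=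
  ([("a", ["b", "c"]), ("b", ["c", "a"])], "a", 2)

def Spec_amis (bdd : List (String × List String)) (nom : String) (d : Int) (out : List String) : Prop := out = amis_alt bdd nom d
instance (bdd : List (String × List String)) (nom : String) (d : Int) (out : List String) : Decidable (Spec_amis bdd nom d out) := by unfold Spec_amis; infer_instance

-- ===== CLAIM (what is proved, stated in full; the proofs are below) =====
def Claim_equal_amis : Prop := ∀ (bdd : List (String × List String)) (nom : String) (d : Int), Dom_amis bdd nom d → Pre_amis bdd nom d → Spec_amis bdd nom d (amis bdd nom d)

-- ===== LEMMAS AND PROOFS =====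

-- endpoints of the walks of length 1..m from u in bdd
def EW (bdd : List (String × List String)) (u : String) : Nat → String → Prop
  | 0 => fun _ => False
  | m + 1 => fun v => v ∈ alGetD bdd u ∨ ∃ a ∈ alGetD bdd u, EW bdd a m v

theorem fAmis_mem (bdd : List (String × List String)) :
    ∀ (fuel : Nat) (u : String) (k dmax : Int) (res : List String),
      k ≤ dmax - 1 → (dmax - 1 - k).toNat ≤ fuel →
      ∀ v, v ∈ fAmis bdd u k dmax res fuel ↔ v ∈ res ∨ EW bdd u (dmax - k).toNat v := by
  intro fuel
  induction fuel with
  | zero =>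
    intro u k dmax res hk hf v
    have hk' : k = dmax - 1 := by omega
    have hm : (dmax - k).toNat = 1 := by omega
    rw [hm]
    rw [fAmis, if_pos hk']
    cases hg : alGet? bdd u with
    | none => simp [EW, alGetD, hg]
    | some fr => simp [EW, alGetD, hg, List.mem_append]
  | succ fuel ih =>
    intro u k dmax res hk hf v
    by_cases hk' : k = dmax - 1
    · have hm : (dmax - k).toNat = 1 := by omega
      rw [hm]
      rw [fAmis, if_pos hk']
      cases hg : alGet? bdd u with
      | none => simp [EW, alGetD, hg]
      | some fr => simp [EW, alGetD, hg, List.mem_append]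
    · have hklt : k < dmax - 1 := lt_of_le_of_ne hk hk'
      have hM1 : (dmax - k).toNat = (dmax - (k + 1)).toNat + 1 := by omega
      rw [hM1]
      rw [fAmis, if_neg hk']
      cases hg : alGet? bdd u with
      | none => simp [EW, alGetD, hg]
      | some fr =>
        have hfold : ∀ (l res' : List String),
            v ∈ List.foldl (fun r ami => ami :: fAmis bdd ami (k + 1) dmax r fuel) res' l ↔
              v ∈ res' ∨ ∃ a ∈ l, (v = a ∨ EW bdd a (dmax - (k + 1)).toNat v) := by
          intro l
          induction l with
          | nil => intro res'; simp
          | cons a t iht =>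
            intro res'
            simp only [List.foldl_cons]
            rw [iht]
            have ha := ih a (k + 1) dmax res' (by omega) (by omega) v
            simp only [List.mem_cons] at ha ⊢
            constructor
            · rintro ((h | h) | ⟨b, hb, h⟩)
              · exact Or.inr ⟨a, Or.inl rfl, Or.inl h⟩
              · rcases ha.mp h with h' | h'
                · exact Or.inl h'
                · exact Or.inr ⟨a, Or.inl rfl, Or.inr h'⟩
              · exact Or.inr ⟨b, Or.inr hb, h⟩
            · rintro (h | ⟨b, hb | hb, h⟩)
              · exact Or.inl (Or.inr (ha.mpr (Or.inl h)))
              · subst hb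
                rcases h with h | h
                · exact Or.inl (Or.inl h)
                · exact Or.inl (Or.inr (ha.mpr (Or.inr h)))
              · exact Or.inr ⟨b, hb, h⟩
        rw [hfold fr res]
        have hfr : alGetD bdd u = fr := by simp [alGetD, hg]
        simp only [EW, hfr]
        constructor
        · rintro (h | ⟨a, ha, h | h⟩)
          · exact Or.inl h
          · exact Or.inr (Or.inl (h ▸ ha))
          · exact Or.inr (Or.inr ⟨a, ha, h⟩)
        · rintro (h | h | ⟨a, ha, h⟩)
          · exact Or.inl h
          · exact Or.inr ⟨v, h, Or.inl rfl⟩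
          · exact Or.inr ⟨a, ha, Or.inr h⟩

theorem EW_mono (bdd : List (String × List String)) :
    ∀ (n : Nat) (u v : String), EW bdd u n v → EW bdd u (n + 1) v := by
  intro n
  induction n with
  | zero => intro u v h; exact h.elim
  | succ n ih =>
    rintro u v (h | ⟨a, ha, h⟩)
    · exact Or.inl h
    · exact Or.inr ⟨a, ha, ih a v h⟩

theorem EW_succ_back (bdd : List (String × List String)) :
    ∀ (n : Nat) (u v : String),
      EW bdd u (n + 1) v ↔ EW bdd u n v ∨
        ∃ w, (w = u ∨ EW bdd u n w) ∧ v ∈ alGetD bdd w := by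
  intro n
  induction n with
  | zero => intro u v; simp [EW]
  | succ n ih =>
    intro u v
    constructor
    · rintro (h | ⟨a, ha, h⟩)
      · exact Or.inl (Or.inl h)
      · rcases (ih a v).mp h with h' | ⟨w, hw | hw, hv⟩
        · exact Or.inl (Or.inr ⟨a, ha, h'⟩)
        · exact Or.inr ⟨w, Or.inr (Or.inl (hw ▸ ha)), hv⟩
        · exact Or.inr ⟨w, Or.inr (Or.inr ⟨a, ha, hw⟩), hv⟩
    · rintro ((h | ⟨a, ha, h⟩) | ⟨w, hw | (hw | ⟨a, ha, hw⟩), hv⟩)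
      · exact Or.inl h
      · exact Or.inr ⟨a, ha, EW_mono bdd n a v h⟩
      · exact Or.inl (hw ▸ hv)
      · exact Or.inr ⟨w, hw, Or.inl hv⟩
      · exact Or.inr ⟨a, ha, (ih a v).mpr (Or.inr ⟨w, Or.inr hw, hv⟩)⟩

-- reachability from nom in ≤ n steps (including nom itself)
def Rln (bdd : List (String × List String)) (nom : String) (n : Nat) (v : String) : Prop :=
  v = nom ∨ EW bdd nom n v

theorem Rln_succ (bdd : List (String × List String)) (nom : String) (n : Nat) (v : String) :
    Rln bdd nom (n + 1) v ↔ Rln bdd nom n v ∨ ∃ u, Rln bdd nom n u ∧ v ∈ alGetD bdd u := by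
  unfold Rln
  rw [EW_succ_back bdd n nom v]
  constructor
  · rintro (h | h | ⟨w, hw, hv⟩)
    · exact Or.inl (Or.inl h)
    · exact Or.inl (Or.inr h)
    · exact Or.inr ⟨w, hw, hv⟩
  · rintro ((h | h) | ⟨w, hw, hv⟩)
    · exact Or.inl h
    · exact Or.inr (Or.inl h)
    · exact Or.inr (Or.inr ⟨w, hw, hv⟩)

theorem Rln_stable (bdd : List (String × List String)) (nom : String) (n : Nat)
    (h : ∀ v, Rln bdd nom (n + 1) v ↔ Rln bdd nom n v) :
    ∀ (j : Nat) (v : String), Rln bdd nom (n + j) v ↔ Rln bdd nom n v := by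
  intro j
  induction j with
  | zero => intro v; rfl
  | succ j ih =>
    intro v
    have h1 : Rln bdd nom (n + j + 1) v ↔ Rln bdd nom (n + j) v ∨
        ∃ u, Rln bdd nom (n + j) u ∧ v ∈ alGetD bdd u := Rln_succ bdd nom (n + j) v
    have h2 : Rln bdd nom (n + 1) v ↔ Rln bdd nom n v ∨
        ∃ u, Rln bdd nom n u ∧ v ∈ alGetD bdd u := Rln_succ bdd nom n v
    calc Rln bdd nom (n + (j + 1)) v
        ↔ Rln bdd nom (n + j) v ∨ ∃ u, Rln bdd nom (n + j) u ∧ v ∈ alGetD bdd u := by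
          rw [← Nat.add_assoc]; exact h1
      _ ↔ Rln bdd nom n v ∨ ∃ u, Rln bdd nom n u ∧ v ∈ alGetD bdd u := by
          constructor
          · rintro (h | ⟨u, hu, hv⟩)
            · exact Or.inl ((ih v).mp h)
            · exact Or.inr ⟨u, (ih u).mp hu, hv⟩
          · rintro (h | ⟨u, hu, hv⟩)
            · exact Or.inl ((ih v).mpr h)
            · exact Or.inr ⟨u, (ih u).mpr hu, hv⟩
      _ ↔ Rln bdd nom n v := h2.symm.trans (h v)

theorem satLoop_mem (bdd : List (String × List String)) (nom : String) :
    ∀ (fuel : Nat) (reached : PySem.Set String) (n : Nat),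
      (∀ x, x ∈ reached ↔ Rln bdd nom n x) →
      ∀ v, v ∈ satLoop bdd reached fuel ↔ Rln bdd nom (n + fuel) v := by
  intro fuel
  induction fuel with
  | zero => intro reached n h v; simpa using h v
  | succ fuel ih =>
    intro reached n h v
    have hnew : ∀ x, x ∈ reached.flatMap (fun u => alGetD bdd u) ↔
        ∃ u, Rln bdd nom n u ∧ x ∈ alGetD bdd u := by
      intro x
      rw [List.mem_flatMap]
      constructor
      · rintro ⟨u, hu, hx⟩; exact ⟨u, (h u).mp hu, hx⟩
      · rintro ⟨u, hu, hx⟩; exact ⟨u, (h u).mpr hu, hx⟩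
    by_cases hall : (reached.flatMap (fun u => alGetD bdd u)).all
        (fun v => PySem.Set.contains reached v) = true
    · have hfix : ∀ x, Rln bdd nom (n + 1) x ↔ Rln bdd nom n x := by
        intro x
        constructor
        · intro hx
          rcases (Rln_succ bdd nom n x).mp hx with hx' | ⟨u, hu, hx'⟩
          · exact hx'
          · have hmem : x ∈ reached.flatMap (fun u => alGetD bdd u) :=
              (hnew x).mpr ⟨u, hu, hx'⟩
            have := List.all_eq_true.mp hall x hmem
            exact (h x).mp ((PySem.Set.contains_iff reached x).mp this)
        · intro hx; exact (Rln_succ bdd nom n x).mpr (Or.inl hx)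
      have hst := Rln_stable bdd nom n hfix (fuel + 1) v
      simp only [satLoop, hall, if_true]
      rw [← Nat.add_assoc] at hst ⊢
      exact (h v).trans hst.symm
    · simp only [satLoop]
      rw [if_neg (by exact fun hc => hall hc)]
      have step := ih (PySem.Set.union reached (reached.flatMap (fun u => alGetD bdd u))) (n + 1)
        (by
          intro x
          rw [PySem.Set.mem_union]
          rw [hnew x]
          exact ((h x).or Iff.rfl).trans (Rln_succ bdd nom n x).symm) v
      rw [step]
      have : n + 1 + fuel = n + (fuel + 1) := by omega
      rw [this]

theorem satLoop_nodup (bdd : List (String × List String)) :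
    ∀ (fuel : Nat) (reached : PySem.Set String), reached.Nodup → (satLoop bdd reached fuel).Nodup := by
  intro fuel
  induction fuel with
  | zero => intro reached h; exact h
  | succ fuel ih =>
    intro reached h
    simp only [satLoop]
    split
    · exact h
    · exact ih _ (PySem.Set.nodup_union _ _ h)

-- ===== VERDICT (by name: the statement is the Claim_ definition above) =====
theorem amis_spec : Claim_equal_amis := by
  intro bdd nom d _ hpre
  show amis bdd nom d = amis_alt bdd nom d
  by_cases hd : 1 ≤ d
  case neg =>
    -- d ≤ 0 and nom has no friends: both sides are the empty set
    have hfuel : d.toNat = 0 := by omega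
    have hA0 : fAmis bdd nom 0 d [] 0 = [] := by
      rw [fAmis, if_neg (by omega)]
      cases alGet? bdd nom <;> rfl
    have hLA : PySem.Set.discard (PySem.Set.ofList (fAmis bdd nom 0 d [] d.toNat)) nom = [] := by
      rw [hfuel, hA0]
      refine List.eq_nil_iff_forall_not_mem.mpr fun x hx => ?_
      rw [PySem.Set.mem_discard, PySem.Set.mem_ofList] at hx
      exact absurd hx.1 (List.not_mem_nil)
    have hLB : PySem.Set.discard (satLoop bdd (PySem.Set.ofList [nom]) d.toNat) nom = [] := by
      rw [hfuel]
      refine List.eq_nil_iff_forall_not_mem.mpr fun x hx => ?_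
      rw [show satLoop bdd (PySem.Set.ofList [nom]) 0 = PySem.Set.ofList [nom] from rfl,
        PySem.Set.mem_discard, PySem.Set.mem_ofList] at hx
      exact hx.2 (List.mem_singleton.mp hx.1)
    unfold amis amis_alt
    rw [hLA, hLB]
  case pos =>
  unfold amis amis_alt
  apply PySem.List.sorted_eq_sorted_of_perm _ _ _ (fun a b h => h)
  have hndA : (PySem.Set.discard (PySem.Set.ofList (fAmis bdd nom 0 d [] d.toNat)) nom).Nodup :=
    PySem.Set.nodup_discard _ _ (PySem.Set.nodup_ofList _)
  have hndB : (PySem.Set.discard (satLoop bdd (PySem.Set.ofList [nom]) d.toNat) nom).Nodup :=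
    PySem.Set.nodup_discard _ _ (satLoop_nodup bdd d.toNat _ (PySem.Set.nodup_ofList _))
  refine (List.perm_ext_iff_of_nodup hndA hndB).mpr ?_
  intro x
  rw [PySem.Set.mem_discard, PySem.Set.mem_discard, PySem.Set.mem_ofList]
  have hA := fAmis_mem bdd d.toNat nom 0 d [] (by omega) (by omega) x
  rw [show d - 0 = d from by ring] at hA
  have hB := satLoop_mem bdd nom d.toNat (PySem.Set.ofList [nom]) 0
    (by
      intro y
      rw [PySem.Set.mem_ofList]
      simp [Rln, EW]) x
  rw [Nat.zero_add] at hB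
  rw [hA, hB]
  unfold Rln
  constructor
  · rintro ⟨h | h, hne⟩
    · cases h
    · exact ⟨Or.inr h, hne⟩
  · rintro ⟨h | h, hne⟩
    · exact absurd h hne
    · exact ⟨Or.inr h, hne⟩
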